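-- pv_equiv track=rewrite | github.com/ravitejapamu/PAMU-RAVITEJA | Problem-2.py | generate_odd_series
-- ===== SOURCE A (Python) =====
-- def generate_odd_series(a):
--     if a <= 0:
--         return ""
--
--     odd_numbers = []
--     current = 1
--     for _ in range(a):
--         odd_numbers.append(current)
--         current += 2
--
--     return ",".join(map(str, odd_numbers))
-- ===== SOURCE B (Python) =====
-- def generate_odd_series(a):
--     if a <= 0:
--         return ""
--
--     def seg(lo, hi):
--         # comma-separated odd numbers with indices lo..hi-1 (value 2*i+1)
--         if hi - lo == 1:
--             return str(2 * lo + 1)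
--         mid = (lo + hi) // 2
--         return seg(lo, mid) + "," + seg(mid, hi)
--
--     return seg(0, a)
-- ===== Notes on version B (the rewrite author's own statement) =====
-- stated objective: alternative
-- what changed: Replaces the linear accumulator loop (list plus a counter stepped by two, then one join) with a divide-and-conquer recursion that splits the index range in half and concatenates the two halves' comma-separated strings, computing each odd value from its index by the closed form 2*i+1.
import Mathlib
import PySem

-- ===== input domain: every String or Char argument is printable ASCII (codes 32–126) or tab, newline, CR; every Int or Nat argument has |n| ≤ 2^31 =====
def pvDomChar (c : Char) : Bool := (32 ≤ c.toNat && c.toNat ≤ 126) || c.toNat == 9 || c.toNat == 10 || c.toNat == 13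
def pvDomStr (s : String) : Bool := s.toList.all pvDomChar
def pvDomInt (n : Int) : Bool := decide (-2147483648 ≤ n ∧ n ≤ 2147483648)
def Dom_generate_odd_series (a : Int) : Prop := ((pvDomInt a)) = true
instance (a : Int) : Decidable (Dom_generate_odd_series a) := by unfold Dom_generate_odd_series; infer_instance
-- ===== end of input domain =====

-- B replaces A's accumulator loop + join with a divide-and-conquer recursion that splits the
-- index range in half and concatenates the halves' strings (alternative decomposition, same cost).

-- ===== PORT A =====
def generate_odd_series (a : Int) : String :=
  if a ≤ 0 then ""
  else
    let st := (PySem.List.pyRange 0 a 1).foldl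
      (fun (p : List Int × Int) _ => (p.1 ++ [p.2], p.2 + 2)) ([], 1)
    PySem.Str.join "," (st.1.map PySem.Int.toStr)

-- ===== PORT B =====
-- seg(lo, hi) from Source B, over List Char ('+' on Python strings = list append on the code points).
-- seg is only ever called with lo < hi; the base test is written 'hi - lo ≤ 1' instead of
-- 'hi - lo == 1' solely so the recursion is total in Lean (Python would recurse forever on
-- hi ≤ lo, a case Source B never reaches since it guards a ≤ 0).
def pvSeg (lo hi : Int) : List Char :=
  if hi - lo ≤ 1 then (PySem.Int.toStr (2 * lo + 1)).toList
  else
    let mid := PySem.Int.floordiv (lo + hi) 2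
    pvSeg lo mid ++ [','] ++ pvSeg mid hi
termination_by (hi - lo).toNat
decreasing_by
  · simp only [PySem.Int.floordiv] at *
    rw [Int.fdiv_eq_ediv] at *
    omega
  · simp only [PySem.Int.floordiv] at *
    rw [Int.fdiv_eq_ediv] at *
    omega

def generate_odd_series_alt (a : Int) : String :=
  if a ≤ 0 then ""
  else String.ofList (pvSeg 0 a)

-- ===== PRECONDITION & SPEC =====
def Spec_generate_odd_series (a : Int) (out : String) : Prop := out = generate_odd_series_alt a
instance (a : Int) (out : String) : Decidable (Spec_generate_odd_series a out) := by unfold Spec_generate_odd_series; infer_instance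

-- ===== CLAIM (what is proved, stated in full; the proofs are below) =====
def Claim_equal_generate_odd_series : Prop := ∀ (a : Int), Dom_generate_odd_series a → Spec_generate_odd_series a (generate_odd_series a)

-- ===== LEMMAS AND PROOFS =====

-- A's loop ignores the element: starting from (acc, c) it appends c, c+2, … for each element.
theorem pv_foldl_odd (l : List Int) (acc : List Int) (c : Int) :
    l.foldl (fun (p : List Int × Int) _ => (p.1 ++ [p.2], p.2 + 2)) (acc, c)
      = (acc ++ (List.range l.length).map (fun k : Nat => c + 2 * (k : Int)), c + 2 * l.length) := by
  induction l generalizing acc c with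
  | nil => simp
  | cons x xs ih =>
    simp only [List.foldl_cons, ih, List.length_cons, List.range_succ_eq_map,
      List.map_cons, List.map_map]
    refine Prod.ext ?_ ?_
    · simp only [List.append_assoc, List.singleton_append]
      refine congrArg _ (List.cons_eq_cons.mpr ⟨by push_cast; ring, List.map_congr_left ?_⟩)
      intro k _
      simp only [Function.comp_apply]
      push_cast
      ring
    · push_cast
      ring

-- join distributes over appending two nonempty part lists.
theorem pv_join_append (sep : List Char) (l₁ l₂ : List (List Char)) (h₁ : l₁ ≠ []) (h₂ : l₂ ≠ []) :
    PySem.Chars.join sep (l₁ ++ l₂) = PySem.Chars.join sep l₁ ++ sep ++ PySem.Chars.join sep l₂ := by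
  induction l₁ with
  | nil => exact absurd rfl h₁
  | cons p rest ih =>
    cases rest with
    | nil =>
      cases l₂ with
      | nil => exact absurd rfl h₂
      | cons q rest₂ =>
        simp [PySem.Chars.join_cons_cons, PySem.Chars.join_singleton]
    | cons q rest' =>
      rw [List.cons_append, List.cons_append, PySem.Chars.join_cons_cons,
        PySem.Chars.join_cons_cons, ← List.cons_append, ih (by simp)]
      simp [List.append_assoc]

-- pvSeg lo hi is the comma-join of the decimal strings of 2*(lo+k)+1 for k < hi-lo.
theorem pv_seg_eq (n : Nat) (lo hi : Int) (hlt : lo < hi) (hn : (hi - lo).toNat = n) :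
    pvSeg lo hi = PySem.Chars.join [',']
      ((List.range n).map (fun k : Nat => (PySem.Int.toStr (2 * (lo + (k : Int)) + 1)).toList)) := by
  induction n using Nat.strong_induction_on generalizing lo hi with
  | _ n ih =>
    rw [pvSeg]
    by_cases hb : hi - lo ≤ 1
    · have hn1 : n = 1 := by omega
      subst hn1
      rw [if_pos hb]
      simp [PySem.Chars.join_singleton]
    · rw [if_neg hb]
      have hfd : PySem.Int.floordiv (lo + hi) 2 = (lo + hi) / 2 := by
        simp only [PySem.Int.floordiv]; rw [Int.fdiv_eq_ediv]; norm_num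
      show pvSeg lo (PySem.Int.floordiv (lo + hi) 2) ++ [','] ++
          pvSeg (PySem.Int.floordiv (lo + hi) 2) hi = _
      rw [hfd]
      set mid := (lo + hi) / 2 with hmid
      have hlo : lo < mid := by omega
      have hhi : mid < hi := by omega
      set m₁ := (mid - lo).toNat with hm₁
      set m₂ := (hi - mid).toNat with hm₂
      have hsum : m₁ + m₂ = n := by omega
      have h₁ : pvSeg lo mid = PySem.Chars.join [',']
          ((List.range m₁).map (fun k : Nat => (PySem.Int.toStr (2 * (lo + (k : Int)) + 1)).toList)) :=
        ih m₁ (by omega) lo mid hlo rfl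
      have h₂ : pvSeg mid hi = PySem.Chars.join [',']
          ((List.range m₂).map (fun k : Nat => (PySem.Int.toStr (2 * (mid + (k : Int)) + 1)).toList)) :=
        ih m₂ (by omega) mid hi hhi rfl
      rw [h₁, h₂, ← hsum, List.range_add, List.map_append,
        pv_join_append _ _ _ (by simp; omega) (by simp; omega), List.map_map]
      congr 2
      refine List.map_congr_left ?_
      intro k _
      simp only [Function.comp_apply]
      have : lo + ((m₁ : Int) + (k : Int)) = mid + (k : Int) := by
        have : (m₁ : Int) = mid - lo := by omega
        omega
      rw [show ((m₁ + k : Nat) : Int) = (m₁ : Int) + (k : Int) by push_cast; ring, this]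

-- ===== VERDICT (by name: the statement is the Claim_ definition above) =====
theorem generate_odd_series_spec : Claim_equal_generate_odd_series := by
  intro a _
  unfold Spec_generate_odd_series generate_odd_series generate_odd_series_alt
  by_cases h : a ≤ 0
  · rw [if_pos h, if_pos h]
  · rw [if_neg h, if_neg h]
    apply String.toList_inj.mp
    rw [String.toList_ofList, pv_seg_eq a.toNat 0 a (by omega) (by omega)]
    simp only [pv_foldl_odd, List.nil_append]
    rw [PySem.List.pyRange_one 0 a, PySem.Str.toList_join]
    simp only [List.length_map, List.length_range, List.map_map, Int.sub_zero]
    congr 1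
    refine List.map_congr_left ?_
    intro k _
    simp only [Function.comp_apply]
    congr 2
    ring
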